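-- pv_equiv track=rewrite | github.com/CubicActivity/FAOC-2025 | Problem 5 (bonus)/FAOC5_bonus.py | evaluate
-- ===== SOURCE A (Python) =====
-- def evaluate(expr):
--     expr = expr.strip()
--
-- #convert hex to text
--     if expr.startswith("HEX("):
--         return bytes.fromhex(expr[4:-1]).decode()
--
-- #reverse string
--     if expr.startswith("REV("):
--         return evaluate(expr[4:-1])[::-1]
--
-- #repeat string n times,
--     if expr.startswith("REP("):
--         inner = expr[4:-1]
--         depth = 0
--         for i, c in enumerate(inner):
--             if c == '(':
--                 depth += 1
--             elif c == ')':
--                 depth -= 1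
--             elif c == ',' and depth == 0:
--                 n_str = inner[:i]
--                 s_expr = inner[i+1:]
--                 break
--         n = int(n_str.strip())
--         return evaluate(s_expr) * n
--
-- #concatenate strings once we reach the comma separator
--     if expr.startswith("CAT("):
--         inner = expr[4:-1]
--         args = []
--         depth = 0
--         last_index = 0
--         for i, c in enumerate(inner):
--             if c == '(':
--                 depth += 1
--             elif c == ')':
--                 depth -= 1
--             elif c == ',' and depth == 0:
--                 args.append(inner[last_index:i])
--                 last_index = i + 1
--         args.append(inner[last_index:])
--         return ''.join(evaluate(arg) for arg in args)
--
--     return expr.strip().strip('"')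
-- ===== SOURCE B (Python) =====
-- # B: a two-phase, compiler-style pipeline.  Phase 1 (_parse) recursively builds a
-- # complete typed AST for the WHOLE expression up front, using buffer-building
-- # top-level-comma splitters; phase 2 (_eval) is a pure structural fold over that
-- # AST which performs all computation (hex decode, reverse, repeat, join).
-- # A, by contrast, re-strips, re-scans and re-slices the raw string at every
-- # recursive step of a single evaluator.
--
-- def _split_first(s):
--     """Split s at its first top-level comma into (before, after); None if absent."""
--     pre, post, found, depth = [], [], False, 0
--     for c in s:
--         if found:
--             post.append(c)
--         elif c == ',' and depth == 0:
--             found = True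
--         else:
--             if c == '(':
--                 depth += 1
--             elif c == ')':
--                 depth -= 1
--             pre.append(c)
--     return (''.join(pre), ''.join(post)) if found else None
--
--
-- def _split_top(s):
--     """Split s at every top-level comma."""
--     parts, buf, depth = [], [], 0
--     for c in s:
--         if c == ',' and depth == 0:
--             parts.append(''.join(buf))
--             buf = []
--         else:
--             if c == '(':
--                 depth += 1
--             elif c == ')':
--                 depth -= 1
--             buf.append(c)
--     parts.append(''.join(buf))
--     return parts
--
--
-- def _parse(expr):
--     """Build the full AST; all actual computation is deferred to _eval."""
--     expr = expr.strip()
--     head, body = expr[:4], expr[4:-1]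
--     if head == "HEX(":
--         return ("HEX", body)
--     if head == "REV(":
--         return ("REV", _parse(body))
--     if head == "REP(":
--         split = _split_first(body)
--         if split is None:
--             raise ValueError("REP needs a count and an argument")
--         return ("REP", split[0], _parse(split[1]))
--     if head == "CAT(":
--         return ("CAT", [_parse(p) for p in _split_top(body)])
--     return ("LIT", expr)
--
--
-- def _eval(node):
--     tag = node[0]
--     if tag == "HEX":
--         return bytes.fromhex(node[1]).decode()
--     if tag == "REV":
--         return _eval(node[1])[::-1]
--     if tag == "REP":
--         return _eval(node[2]) * int(node[1].strip())
--     if tag == "CAT":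
--         return ''.join(_eval(child) for child in node[1])
--     return node[1].strip('"')
--
--
-- def evaluate(expr):
--     return _eval(_parse(expr))
-- ===== Notes on version B (the rewrite author's own statement) =====
-- stated objective: alternative
-- what changed: B replaces A's single recursive evaluator (which re-strips, re-scans with enumerate/depth counters and re-slices the raw string at every recursive step) by a compiler-style pipeline: a recursive parser first builds the complete typed AST for the whole expression using buffer-building top-level-comma splitters, then a separate structural fold over that AST performs all computation (hex decode, reverse, repeat, join).
import Mathlib
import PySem

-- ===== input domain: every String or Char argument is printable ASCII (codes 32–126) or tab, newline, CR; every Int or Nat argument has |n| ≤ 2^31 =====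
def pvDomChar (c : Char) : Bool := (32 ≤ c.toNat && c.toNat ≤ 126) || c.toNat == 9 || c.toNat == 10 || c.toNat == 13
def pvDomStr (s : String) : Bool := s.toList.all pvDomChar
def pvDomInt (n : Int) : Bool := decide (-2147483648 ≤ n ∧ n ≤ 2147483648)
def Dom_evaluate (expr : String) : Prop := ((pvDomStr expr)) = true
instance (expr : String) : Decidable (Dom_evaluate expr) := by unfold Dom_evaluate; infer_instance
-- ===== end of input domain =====

-- B re-implements A as a compiler-style pipeline — a recursive parser builds the COMPLETE
-- typed AST up front (with buffer-building top-level-comma splitters), then a separate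
-- structural fold over the AST performs all computation — instead of A's single recursive
-- evaluator that re-strips and re-slices the raw string at every step; objective:
-- alternative structure, no speed claim.

-- ===== SHARED MODELS OF PYTHON BUILT-INS (used by both ports: both Pythons call
-- bytes.fromhex(...).decode() and int(...); PySem has no fromhex/decode, so they are
-- hand-ported here, exact on all byte sequences) =====

-- ASCII whitespace skipped by bytes.fromhex between byte pairs (CPython 3.11)
def pyHexWs (c : Char) : Bool := c = ' ' || c = '\t' || c = '\n' || c = '\x0b' || c = '\x0c' || c = '\r'

def hexVal? (c : Char) : Option Nat :=
  if '0' ≤ c ∧ c ≤ '9' then some (c.toNat - 48)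
  else if 'a' ≤ c ∧ c ≤ 'f' then some (c.toNat - 87)
  else if 'A' ≤ c ∧ c ≤ 'F' then some (c.toNat - 55)
  else none

-- bytes.fromhex: whitespace-separated two-digit pairs; none = ValueError (exact for CPython 3.11)
def pyFromhex? : List Char → Option (List Nat)
  | [] => some []
  | c :: cs =>
    if pyHexWs c then pyFromhex? cs
    else match cs with
      | [] => none
      | c2 :: rest =>
        match hexVal? c, hexVal? c2 with
        | some h, some l => (pyFromhex? rest).map (fun bs => (16 * h + l) :: bs)
        | _, _ => none

-- strict UTF-8 decoding, exact for CPython's bytes.decode(): rejects continuation-byte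
-- errors, overlong encodings, surrogates and code points above 0x10FFFF (none = UnicodeDecodeError)
def pyUtf8Decode? : List Nat → Option (List Char)
  | [] => some []
  | b :: bs =>
    if b < 0x80 then (pyUtf8Decode? bs).map (fun r => Char.ofNat b :: r)
    else if 0xC2 ≤ b ∧ b ≤ 0xDF then
      match bs with
      | c1 :: rest =>
        if 0x80 ≤ c1 ∧ c1 ≤ 0xBF then
          (pyUtf8Decode? rest).map (fun r => Char.ofNat ((b - 0xC0) * 64 + (c1 - 0x80)) :: r)
        else none
      | [] => none
    else if 0xE0 ≤ b ∧ b ≤ 0xEF then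
      match bs with
      | c1 :: c2 :: rest =>
        if (if b = 0xE0 then 0xA0 else 0x80) ≤ c1 ∧ c1 ≤ (if b = 0xED then 0x9F else 0xBF)
            ∧ 0x80 ≤ c2 ∧ c2 ≤ 0xBF then
          (pyUtf8Decode? rest).map
            (fun r => Char.ofNat ((b - 0xE0) * 4096 + (c1 - 0x80) * 64 + (c2 - 0x80)) :: r)
        else none
      | _ => none
    else if 0xF0 ≤ b ∧ b ≤ 0xF4 then
      match bs with
      | c1 :: c2 :: c3 :: rest =>
        if (if b = 0xF0 then 0x90 else 0x80) ≤ c1 ∧ c1 ≤ (if b = 0xF4 then 0x8F else 0xBF)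
            ∧ 0x80 ≤ c2 ∧ c2 ≤ 0xBF ∧ 0x80 ≤ c3 ∧ c3 ≤ 0xBF then
          (pyUtf8Decode? rest).map
            (fun r => Char.ofNat ((b - 0xF0) * 262144 + (c1 - 0x80) * 4096
              + (c2 - 0x80) * 64 + (c3 - 0x80)) :: r)
        else none
      | _ => none
    else none

-- bytes.fromhex(s).decode(); none where either step raises
def pyFromhexDecode? (s : List Char) : Option (List Char) :=
  (pyFromhex? s).bind pyUtf8Decode?

-- ===== REFERENCE TOP-LEVEL-COMMA SPLITTERS (used by Pre_evaluate and the proofs) =====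

def newDepth (d : Int) (c : Char) : Int := if c = '(' then d + 1 else if c = ')' then d - 1 else d

-- first top-level comma: some (before, after), none if there is none
def split1R : Int → List Char → Option (List Char × List Char)
  | _, [] => none
  | d, c :: cs =>
    if c = ',' ∧ d = 0 then some ([], cs)
    else (split1R (newDepth d c) cs).map (fun p => (c :: p.1, p.2))

-- split at every top-level comma (never returns [])
def splitAllR : Int → List Char → List (List Char)
  | _, [] => [[]]
  | d, c :: cs =>
    if c = ',' ∧ d = 0 then [] :: splitAllR 0 cs
    else match splitAllR (newDepth d c) cs with
      | [] => [[c]]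
      | h :: t => (c :: h) :: t

theorem split1R_len {d : Int} {cs a b : List Char} (h : split1R d cs = some (a, b)) :
    a.length ≤ cs.length ∧ b.length < cs.length := by
  induction cs generalizing d a b with
  | nil => simp [split1R] at h
  | cons c cs ih =>
    rw [split1R] at h
    split_ifs at h with hc
    · simp only [Option.some.injEq, Prod.mk.injEq] at h
      obtain ⟨h1, h2⟩ := h; subst h1; subst h2; simp
    · rw [Option.map_eq_some_iff] at h
      obtain ⟨p, hp, heq⟩ := h
      simp only [Prod.mk.injEq] at heq
      obtain ⟨h1, h2⟩ := heq
      subst h1; subst h2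
      obtain ⟨hp1, hp2⟩ := ih hp
      constructor <;> simp <;> omega

theorem splitAllR_len {d : Int} {cs x : List Char} (h : x ∈ splitAllR d cs) :
    x.length ≤ cs.length := by
  induction cs generalizing d x with
  | nil => simp [splitAllR] at h; simp [h]
  | cons c cs ih =>
    rw [splitAllR] at h
    split_ifs at h with hc
    · rcases List.mem_cons.1 h with h | h
      · simp [h]
      · exact le_trans (ih h) (by simp)
    · rcases hm : splitAllR (newDepth d c) cs with _ | ⟨hd, tl⟩
      · rw [hm] at h; simp at h; simp [h]
      · rw [hm] at h
        rcases List.mem_cons.1 h with h | h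
        · subst h
          have := ih (hm ▸ List.mem_cons_self (l := tl))
          simpa using Nat.succ_le_succ this
        · exact le_trans (ih (hm ▸ List.mem_cons_of_mem hd h)) (by simp)

theorem splitAllR_ne_nil (d : Int) (cs : List Char) : splitAllR d cs ≠ [] := by
  cases cs with
  | nil => simp [splitAllR]
  | cons c cs =>
    rw [splitAllR]
    split_ifs
    · simp
    · rcases hm : splitAllR (newDepth d c) cs with _ | _ <;> simp

-- length bookkeeping shared by the termination arguments
theorem strip_length_le (s : List Char) : (PySem.Chars.strip s).length ≤ s.length := by
  unfold PySem.Chars.strip PySem.Chars.rstrip PySem.Chars.lstrip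
  calc (List.dropWhile PySem.Chars.isspace (List.dropWhile PySem.Chars.isspace s).reverse).reverse.length
      ≤ (List.dropWhile PySem.Chars.isspace s).length := by
        rw [List.length_reverse]
        exact le_trans (List.length_dropWhile_le _ _) (by simp)
    _ ≤ s.length := List.length_dropWhile_le _ _

theorem slice_from_length_le (l : List Char) (a : Int) :
    (PySem.List.slice l (some a) none).length ≤ l.length := by
  rw [PySem.List.slice_some_none]
  simp

theorem slice_length_le (l : List Char) (a b : Int) :
    (PySem.List.slice l (some a) (some b)).length ≤ l.length := by
  rw [PySem.List.length_slice]
  have := PySem.List.clampIdx_le (n := l.length) (i := b)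
  omega

theorem body_length_lt {t : List Char} (h : 4 ≤ t.length) :
    (PySem.List.slice t (some 4) (some (-1))).length < t.length := by
  rw [PySem.List.length_slice]
  have h1 : PySem.List.clampIdx t.length (-1) = t.length - 1 := PySem.List.clampIdx_neg_one _
  have h4 : ((4:Int)) = ((4:Nat):Int) := by norm_num
  have h2 : PySem.List.clampIdx t.length 4 = min 4 t.length := by
    rw [h4, PySem.List.clampIdx_natCast]
  omega

theorem startswith_four_length {t p : List Char} (hp : p.length = 4)
    (h : PySem.Chars.startswith t p = true) : 4 ≤ t.length := by
  have h1 := (PySem.Chars.startswith_iff t p).1 h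
  have h2 := h1.length_le
  omega

-- ===== PORT A ===== (Source A: one recursive evaluator; index/slice based comma scans)

-- the REP loop: 'for i, c in enumerate(inner): ... elif c==',' and depth==0: ...; break'
def findCommaA : List (Int × Char) → Int → Option Int
  | [], _ => none
  | (i, c) :: rest, depth =>
    if c = '(' then findCommaA rest (depth + 1)
    else if c = ')' then findCommaA rest (depth - 1)
    else if c = ',' ∧ depth = 0 then some i
    else findCommaA rest depth

-- the CAT loop body over enumerate(inner), state (args, depth, last_index)
def catStepA (inner : List Char) (st : List (List Char) × Int × Int) (p : Int × Char) :
    List (List Char) × Int × Int :=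
  if p.2 = '(' then (st.1, st.2.1 + 1, st.2.2)
  else if p.2 = ')' then (st.1, st.2.1 - 1, st.2.2)
  else if p.2 = ',' ∧ st.2.1 = 0 then
    (st.1 ++ [PySem.List.slice inner (some st.2.2) (some p.1)], st.2.1, p.1 + 1)
  else st

-- args after the loop plus the trailing 'inner[last_index:]'
def catArgsA (inner : List Char) : List (List Char) :=
  let r := (PySem.List.enumerate inner 0).foldl (catStepA inner) ([], 0, 0)
  r.1 ++ [PySem.List.slice inner (some r.2.2) none]

theorem catFold_bound (inner : List Char) (l : List (Int × Char)) :
    ∀ st : List (List Char) × Int × Int, (∀ x ∈ st.1, x.length ≤ inner.length) →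
      ∀ x ∈ (l.foldl (catStepA inner) st).1, x.length ≤ inner.length := by
  induction l with
  | nil => intro st h x hx; exact h x hx
  | cons p l ih =>
    intro st h x hx
    refine ih _ ?_ x hx
    intro y hy
    unfold catStepA at hy
    split_ifs at hy with h1 h2 h3
    · exact h y hy
    · exact h y hy
    · rcases List.mem_append.1 hy with hy | hy
      · exact h y hy
      · rw [List.mem_singleton] at hy; subst hy; exact slice_length_le _ _ _
    · exact h y hy

theorem catArgsA_len {inner x : List Char} (h : x ∈ catArgsA inner) : x.length ≤ inner.length := by
  unfold catArgsA at h
  simp only at h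
  rcases List.mem_append.1 h with h | h
  · exact catFold_bound inner _ ([], 0, 0) (by simp) x h
  · rw [List.mem_singleton] at h; subst h; exact slice_from_length_le _ _

def evalA (s : List Char) : List Char :=
  let t := PySem.Chars.strip s
  if hH : PySem.Chars.startswith t ("HEX(".toList) then
    -- bytes.fromhex(expr[4:-1]).decode(); [] where Python raises (outside Pre_)
    match pyFromhexDecode? (PySem.List.slice t (some 4) (some (-1))) with
    | some r => r
    | none => []
  else if hV : PySem.Chars.startswith t ("REV(".toList) then
    -- evaluate(expr[4:-1])[::-1]  (s[::-1] is reverse)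
    (evalA (PySem.List.slice t (some 4) (some (-1)))).reverse
  else if hP : PySem.Chars.startswith t ("REP(".toList) then
    let inner := PySem.List.slice t (some 4) (some (-1))
    match findCommaA (PySem.List.enumerate inner 0) 0 with
    | none => []  -- Python: NameError (n_str unbound); outside Pre_
    | some i =>
      let nstr := PySem.List.slice inner none (some i)
      let sexpr := PySem.List.slice inner (some (i + 1)) none
      match PySem.Int.ofChars? (PySem.Chars.strip nstr) with
      | none => []  -- Python: ValueError from int(); outside Pre_
      | some n => PySem.List.pyRepeat (evalA sexpr) n
  else if hC : PySem.Chars.startswith t ("CAT(".toList) then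
    let inner := PySem.List.slice t (some 4) (some (-1))
    PySem.Chars.join [] ((catArgsA inner).attach.map (fun x => evalA x.1))
  else
    PySem.Chars.stripChars (PySem.Chars.strip t) ("\"".toList)
termination_by s.length
decreasing_by
  · exact lt_of_lt_of_le (body_length_lt (startswith_four_length rfl hV)) (strip_length_le s)
  · exact lt_of_le_of_lt (slice_from_length_le _ _)
      (lt_of_lt_of_le (body_length_lt (startswith_four_length rfl hP)) (strip_length_le s))
  · exact lt_of_le_of_lt (catArgsA_len x.2)
      (lt_of_lt_of_le (body_length_lt (startswith_four_length rfl hC)) (strip_length_le s))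

def evaluate (expr : String) : String := String.ofList (evalA expr.toList)

-- ===== PORT B ===== (Source B: phase 1 parses the whole string into a complete typed AST,
-- phase 2 is a pure structural fold over the AST)

-- _split_first: buffer-building scan, state (pre, post, found, depth)
def sfStepB (st : List Char × List Char × Bool × Int) (c : Char) :
    List Char × List Char × Bool × Int :=
  match st with
  | (pre, post, found, d) =>
    if found then (pre, post ++ [c], true, d)
    else if c = ',' ∧ d = 0 then (pre, post, true, d)
    else (pre ++ [c], post, false, newDepth d c)

def splitFirstB (s : List Char) : Option (List Char × List Char) :=
  let r := s.foldl sfStepB ([], [], false, 0)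
  if r.2.2.1 then some (r.1, r.2.1) else none

-- _split_top: buffer-building scan, state (parts, buf, depth)
def saStepB (st : List (List Char) × List Char × Int) (c : Char) :
    List (List Char) × List Char × Int :=
  match st with
  | (parts, buf, d) =>
    if c = ',' ∧ d = 0 then (parts ++ [buf], [], d)
    else (parts, buf ++ [c], newDepth d c)

def splitAllB (s : List Char) : List (List Char) :=
  let r := s.foldl saStepB ([], [], 0)
  r.1 ++ [r.2.1]


-- a pending buffer prepended to the first piece (proof-side view of the splitters)
def consHead (buf : List Char) : List (List Char) → List (List Char)
  | [] => [buf]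
  | h :: t => (buf ++ h) :: t

theorem sfStepB_found (cs : List Char) (pre post : List Char) (d : Int) :
    cs.foldl sfStepB (pre, post, true, d) = (pre, post ++ cs, true, d) := by
  induction cs generalizing post with
  | nil => simp
  | cons c cs ih => simp [sfStepB, ih]

theorem sfStepB_spec (cs : List Char) (pre : List Char) (d : Int) :
    (let r := cs.foldl sfStepB (pre, [], false, d)
     if r.2.2.1 then some (r.1, r.2.1) else none)
      = (split1R d cs).map (fun p => (pre ++ p.1, p.2)) := by
  induction cs generalizing pre d with
  | nil => simp [split1R]
  | cons c cs ih =>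
    by_cases hc : c = ',' ∧ d = 0
    · have hstep : sfStepB (pre, [], false, d) c = (pre, [], true, d) := by
        simp [sfStepB, hc]
      rw [split1R, if_pos hc]
      simp only [List.foldl_cons]
      rw [hstep, sfStepB_found]
      simp
    · have hstep : sfStepB (pre, [], false, d) c = (pre ++ [c], [], false, newDepth d c) := by
        simp [sfStepB, hc]
      rw [split1R, if_neg hc]
      simp only [List.foldl_cons]
      rw [hstep]
      have := ih (pre ++ [c]) (newDepth d c)
      simp only at this ⊢
      rw [this, Option.map_map]
      cases split1R (newDepth d c) cs <;> simp

theorem splitFirstB_eq (s : List Char) : splitFirstB s = split1R 0 s := by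
  unfold splitFirstB
  have := sfStepB_spec s [] 0
  simp only at this ⊢
  rw [this]
  cases split1R 0 s <;> simp

theorem saStepB_spec (cs : List Char) (parts : List (List Char)) (buf : List Char) (d : Int) :
    (let r := cs.foldl saStepB (parts, buf, d)
     r.1 ++ [r.2.1]) = parts ++ consHead buf (splitAllR d cs) := by
  induction cs generalizing parts buf d with
  | nil => simp [splitAllR, consHead]
  | cons c cs ih =>
    by_cases hc : c = ',' ∧ d = 0
    · obtain ⟨hc1, hc2⟩ := hc
      subst hc2
      have hstep : saStepB (parts, buf, 0) c = (parts ++ [buf], [], 0) := by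
        simp [saStepB, hc1]
      rw [splitAllR, if_pos ⟨hc1, rfl⟩]
      simp only [List.foldl_cons]
      rw [hstep, ih]
      rcases hm : splitAllR 0 cs with _ | ⟨hd, tl⟩
      · exact absurd hm (splitAllR_ne_nil 0 cs)
      · simp [consHead]
    · have hstep : saStepB (parts, buf, d) c = (parts, buf ++ [c], newDepth d c) := by
        simp [saStepB, hc]
      rw [splitAllR, if_neg hc]
      simp only [List.foldl_cons]
      rw [hstep, ih]
      rcases hm : splitAllR (newDepth d c) cs with _ | ⟨hd, tl⟩
      · exact absurd hm (splitAllR_ne_nil _ cs)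
      · simp [consHead]

theorem splitFirstB_len {cs a b : List Char} (h : splitFirstB cs = some (a, b)) :
    b.length < cs.length := by
  rw [splitFirstB_eq] at h
  exact (split1R_len h).2

theorem splitAllB_eq (s : List Char) : splitAllB s = splitAllR 0 s := by
  unfold splitAllB
  have := saStepB_spec s [] [] 0
  simp only at this ⊢
  rw [this]
  rcases hm : splitAllR 0 s with _ | ⟨hd, tl⟩
  · exact absurd hm (splitAllR_ne_nil 0 s)
  · simp [consHead]

theorem head_eq_iff (t p : List Char) (hp : p.length = 4) :
    PySem.List.slice t none (some 4) = p ↔ PySem.Chars.startswith t p = true := by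
  rw [PySem.List.slice_to t (by norm_num : (0:Int) ≤ 4), PySem.Chars.startswith_iff,
    List.prefix_iff_eq_take, hp]
  exact eq_comm

theorem splitAllB_len {cs x : List Char} (h : x ∈ splitAllB cs) : x.length ≤ cs.length := by
  rw [splitAllB_eq] at h
  exact splitAllR_len h

-- the AST _parse builds: tagged nodes with the computation deferred to evalAst
-- (err = the 'raise ValueError' in _parse for a REP without a top-level comma; outside Pre_)
mutual
inductive AstB : Type
  | lit (t : List Char)
  | hex (body : List Char)
  | rev (child : AstB)
  | rep (nstr : List Char) (child : AstB)
  | cat (children : AstListB)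
  | err
-- explicit child-list type (a mutual pair, no nested inductive)
inductive AstListB : Type
  | nil
  | cons (h : AstB) (t : AstListB)
end

def toAstList : List AstB → AstListB
  | [] => .nil
  | h :: t => .cons h (toAstList t)

def parseB (s : List Char) : AstB :=
  -- t = expr.strip(); head = expr[:4]; body = expr[4:-1]
  if hH : PySem.List.slice (PySem.Chars.strip s) none (some 4) = "HEX(".toList then
    .hex (PySem.List.slice (PySem.Chars.strip s) (some 4) (some (-1)))
  else if hV : PySem.List.slice (PySem.Chars.strip s) none (some 4) = "REV(".toList then
    .rev (parseB (PySem.List.slice (PySem.Chars.strip s) (some 4) (some (-1))))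
  else if hP : PySem.List.slice (PySem.Chars.strip s) none (some 4) = "REP(".toList then
    match hsp : splitFirstB (PySem.List.slice (PySem.Chars.strip s) (some 4) (some (-1))) with
    | none => .err  -- Python: raise ValueError; outside Pre_
    | some p => .rep p.1 (parseB p.2)
  else if hC : PySem.List.slice (PySem.Chars.strip s) none (some 4) = "CAT(".toList then
    .cat (toAstList ((splitAllB (PySem.List.slice (PySem.Chars.strip s) (some 4) (some (-1)))).attach.map
      (fun x => parseB x.1)))
  else .lit (PySem.Chars.strip s)
termination_by s.length
decreasing_by
  · exact lt_of_lt_of_le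
      (body_length_lt (startswith_four_length rfl ((head_eq_iff _ _ rfl).1 hV)))
      (strip_length_le s)
  · exact lt_of_lt_of_le (lt_trans (splitFirstB_len hsp)
      (body_length_lt (startswith_four_length rfl ((head_eq_iff _ _ rfl).1 hP))))
      (strip_length_le s)
  · exact lt_of_le_of_lt (splitAllB_len x.2)
      (lt_of_lt_of_le (body_length_lt (startswith_four_length rfl ((head_eq_iff _ _ rfl).1 hC)))
        (strip_length_le s))

mutual
def evalAst : AstB → List Char
  | .lit t => PySem.Chars.stripChars t ("\"".toList)
  | .hex body =>
    match pyFromhexDecode? body with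
    | some r => r
    | none => []  -- Python raises; outside Pre_
  | .rev c => (evalAst c).reverse
  | .rep nstr c =>
    match PySem.Int.ofChars? (PySem.Chars.strip nstr) with
    | none => []  -- Python raises; outside Pre_
    | some n => PySem.List.pyRepeat (evalAst c) n
  | .cat cs => PySem.Chars.join [] (evalAstList cs)
  | .err => []  -- Python raises; outside Pre_
def evalAstList : AstListB → List (List Char)
  | .nil => []
  | .cons h t => evalAst h :: evalAstList t
end

def evaluate_alt (expr : String) : String := String.ofList (evalAst (parseB expr.toList))

-- ===== PRECONDITION & SPEC =====

-- Pre_evaluate excludes exactly the inputs where the Python raises: invalid hex or invalid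
-- UTF-8 in HEX (ValueError / UnicodeDecodeError), REP without a top-level comma (NameError)
-- or with a non-integer count (ValueError), recursively through REV/REP/CAT.  The DSL is
-- recursive, so this well-formedness grammar is necessarily recursive too; it only inspects
-- the input's shape, never an output value.  (The Nat argument exists only so the recursion
-- is structural and `decide` can evaluate it: it starts above the string's length, which
-- strictly shrinks at every nested call.)
def wfE : Nat → List Char → Bool
  | 0, _ => false  -- unreachable: the bound starts above the string's length, which shrinks faster
  | n+1, s =>
    let t := PySem.Chars.strip s
    let body := PySem.List.slice t (some 4) (some (-1))
    if PySem.Chars.startswith t ("HEX(".toList) then (pyFromhexDecode? body).isSome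
    else if PySem.Chars.startswith t ("REV(".toList) then wfE n body
    else if PySem.Chars.startswith t ("REP(".toList) then
      match split1R 0 body with
      | none => false
      | some p => (PySem.Int.ofChars? (PySem.Chars.strip p.1)).isSome && wfE n p.2
    else if PySem.Chars.startswith t ("CAT(".toList) then (splitAllR 0 body).all (wfE n)
    else true

def Pre_evaluate (expr : String) : Prop := wfE (expr.toList.length + 1) expr.toList = true
instance (expr : String) : Decidable (Pre_evaluate expr) := by unfold Pre_evaluate; infer_instance

def pvWitness_evaluate : String := "ab"

def Spec_evaluate (expr : String) (out : String) : Prop := out = evaluate_alt expr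
instance (expr : String) (out : String) : Decidable (Spec_evaluate expr out) := by unfold Spec_evaluate; infer_instance

-- ===== CLAIM (what is proved, stated in full; the proofs are below) =====
def Claim_equal_evaluate : Prop := ∀ (expr : String), Dom_evaluate expr → Pre_evaluate expr → Spec_evaluate expr (evaluate expr)

-- ===== LEMMAS AND PROOFS =====

theorem dropWhile_eq_self_of_head (p : Char → Bool) (l : List Char)
    (h : ∀ x ∈ l.head?, ¬ p x) : List.dropWhile p l = l := by
  cases l with
  | nil => rfl
  | cons a l => simp_all

theorem head?_of_prefix {α : Type} {r t l : List α} {x : α} (ht : r ++ t = l)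
    (hx : r.head? = some x) : l.head? = some x := by
  subst ht; cases r <;> simp_all

theorem strip_idem (s : List Char) :
    PySem.Chars.strip (PySem.Chars.strip s) = PySem.Chars.strip s := by
  unfold PySem.Chars.strip PySem.Chars.rstrip PySem.Chars.lstrip
  have hpre : ((List.dropWhile PySem.Chars.isspace (List.dropWhile PySem.Chars.isspace s).reverse).reverse)
      <+: List.dropWhile PySem.Chars.isspace s := by
    rw [← List.reverse_suffix]
    simpa using List.dropWhile_suffix (l := (List.dropWhile PySem.Chars.isspace s).reverse)
      PySem.Chars.isspace
  obtain ⟨t, ht⟩ := hpre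
  have hhead : ∀ x ∈ ((List.dropWhile PySem.Chars.isspace (List.dropWhile PySem.Chars.isspace s).reverse).reverse).head?, ¬ PySem.Chars.isspace x := by
    intro x hx
    have h0 := List.head?_dropWhile_not PySem.Chars.isspace s
    rw [head?_of_prefix ht hx] at h0
    simpa using h0
  rw [dropWhile_eq_self_of_head _ _ hhead, List.reverse_reverse, List.dropWhile_idempotent]

theorem split1R_decomp {d : Int} {cs a b : List Char} (h : split1R d cs = some (a, b)) :
    cs = a ++ ',' :: b := by
  induction cs generalizing d a b with
  | nil => simp [split1R] at h
  | cons c cs ih =>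
    rw [split1R] at h
    split_ifs at h with hc
    · simp only [Option.some.injEq, Prod.mk.injEq] at h
      obtain ⟨h1, h2⟩ := h; subst h1; subst h2
      simp [hc.1]
    · rw [Option.map_eq_some_iff] at h
      obtain ⟨p, hp, heq⟩ := h
      simp only [Prod.mk.injEq] at heq
      obtain ⟨h1, h2⟩ := heq
      subst h1; subst h2
      simp [ih hp]

theorem findCommaA_spec (u : List Char) : ∀ (k d : Int),
    findCommaA (PySem.List.enumerate u k) d
      = (split1R d u).map (fun p => k + (p.1.length : Int)) := by
  induction u with
  | nil => intro k d; simp [PySem.List.enumerate, findCommaA, split1R]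
  | cons c cs ih =>
    intro k d
    rw [show PySem.List.enumerate (c::cs) k = (k, c) :: PySem.List.enumerate cs (k+1) from rfl]
    rw [findCommaA, split1R]
    by_cases h1 : c = '('
    · rw [if_pos h1, ih, if_neg (by simp [h1]),
        show newDepth d c = d + 1 from by simp [newDepth, h1]]
      cases split1R (d+1) cs <;> simp <;> push_cast <;> ring
    · rw [if_neg h1]
      by_cases h2 : c = ')'
      · rw [if_pos h2, ih, if_neg (by simp [h2]),
          show newDepth d c = d - 1 from by simp [newDepth, h1, h2]]
        cases split1R (d-1) cs <;> simp <;> push_cast <;> ring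
      · rw [if_neg h2]
        by_cases h3 : c = ',' ∧ d = 0
        · rw [if_pos h3, if_pos h3]
          simp
        · rw [if_neg h3, if_neg h3, ih,
            show newDepth d c = d from by simp [newDepth, h1, h2]]
          cases split1R d cs <;> simp <;> push_cast <;> ring

theorem slice_snoc {inner cs : List Char} {c : Char} {k l : Nat} (hk : inner.drop k = c :: cs)
    (hl : l ≤ k) :
    PySem.List.slice inner (some (l : Int)) (some ((k + 1 : Nat) : Int))
      = PySem.List.slice inner (some (l : Int)) (some (k : Int)) ++ [c] := by
  rw [PySem.List.slice_natCast, PySem.List.slice_natCast]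
  rw [show k+1-l = (k-l)+1 from by omega, List.take_add_one]
  congr 1
  have hget : (inner.drop l)[k-l]? = some c := by
    rw [List.getElem?_drop, show l + (k-l) = k from by omega, ← List.head?_drop, hk]
    rfl
  rw [hget]
  rfl

theorem drop_tail {inner cs : List Char} {c : Char} {k : Nat} (hk : inner.drop k = c :: cs) :
    inner.drop (k+1) = cs := by
  have := congrArg (List.drop 1) hk
  simpa [List.drop_drop] using this

theorem catStepA_spec (inner : List Char) (u : List Char) : ∀ (k l : Nat)
    (args : List (List Char)) (d : Int), inner.drop k = u → l ≤ k →
    (let r := (PySem.List.enumerate u (k : Int)).foldl (catStepA inner) (args, d, (l : Int))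
     r.1 ++ [PySem.List.slice inner (some r.2.2) none])
      = args ++ consHead (PySem.List.slice inner (some (l : Int)) (some (k : Int)))
          (splitAllR d u) := by
  induction u with
  | nil =>
    intro k l args d hk hl
    have hlen : inner.length ≤ k := by
      have := congrArg List.length hk
      simp at this
      omega
    simp only [PySem.List.enumerate, List.foldl_nil, splitAllR, consHead]
    rw [PySem.List.slice_from _ (Int.natCast_nonneg l), PySem.List.slice_natCast]
    rw [Int.toNat_natCast, List.take_of_length_le (by simp; omega)]
    simp
  | cons c cs ih =>
    intro k l args d hk hl
    rw [show PySem.List.enumerate (c::cs) (k:Int) = ((k:Int), c) :: PySem.List.enumerate cs ((k:Int)+1) from rfl]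
    rw [show ((k:Int)+1) = ((k+1:Nat):Int) from by push_cast; ring]
    simp only [List.foldl_cons]
    by_cases h1 : c = '('
    · rw [show catStepA inner (args, d, (l:Int)) ((k:Int), c) = (args, d+1, (l:Int)) from by
        simp [catStepA, h1]]
      rw [ih (k+1) l args (d+1) (drop_tail hk) (by omega)]
      rw [splitAllR, if_neg (by simp [h1]), show newDepth d c = d + 1 from by simp [newDepth, h1]]
      rcases hm : splitAllR (d+1) cs with _ | ⟨hd, tl⟩
      · exact absurd hm (splitAllR_ne_nil _ cs)
      · rw [slice_snoc hk hl]
        simp [consHead, h1]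
    · by_cases h2 : c = ')'
      · rw [show catStepA inner (args, d, (l:Int)) ((k:Int), c) = (args, d-1, (l:Int)) from by
          simp [catStepA, h1, h2]]
        rw [ih (k+1) l args (d-1) (drop_tail hk) (by omega)]
        rw [splitAllR, if_neg (by simp [h2]), show newDepth d c = d - 1 from by
          simp [newDepth, h1, h2]]
        rcases hm : splitAllR (d-1) cs with _ | ⟨hd, tl⟩
        · exact absurd hm (splitAllR_ne_nil _ cs)
        · rw [slice_snoc hk hl]
          simp [consHead, h2]
      · by_cases h3 : c = ',' ∧ d = 0
        · obtain ⟨hc, hd0⟩ := h3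
          subst hd0
          rw [show catStepA inner (args, 0, (l:Int)) ((k:Int), c)
              = (args ++ [PySem.List.slice inner (some (l:Int)) (some (k:Int))], 0, (k:Int)+1) from by
            simp [catStepA, h1, h2, hc]]
          rw [show ((k:Int)+1) = ((k+1:Nat):Int) from by push_cast; ring]
          rw [ih (k+1) (k+1) _ 0 (drop_tail hk) (by omega)]
          rw [splitAllR, if_pos ⟨hc, rfl⟩]
          rcases hm : splitAllR 0 cs with _ | ⟨hd, tl⟩
          · exact absurd hm (splitAllR_ne_nil _ cs)
          · have hnil : PySem.List.slice inner (some ((k+1:Nat):Int)) (some ((k+1:Nat):Int)) = [] := by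
              rw [PySem.List.slice_natCast]
              simp
            rw [hnil]
            simp [consHead]
        · rw [show catStepA inner (args, d, (l:Int)) ((k:Int), c) = (args, d, (l:Int)) from by
            simp [catStepA, h1, h2]
            intro hc hd0
            exact absurd ⟨hc, hd0⟩ h3]
          rw [ih (k+1) l args d (drop_tail hk) (by omega)]
          rw [splitAllR, if_neg h3, show newDepth d c = d from by simp [newDepth, h1, h2]]
          rcases hm : splitAllR d cs with _ | ⟨hd, tl⟩
          · exact absurd hm (splitAllR_ne_nil _ cs)
          · rw [slice_snoc hk hl]
            simp [consHead]

theorem catArgsA_eq (inner : List Char) : catArgsA inner = splitAllR 0 inner := by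
  unfold catArgsA
  have h := catStepA_spec inner inner 0 0 [] 0 (by simp) (le_refl 0)
  simp only [Nat.cast_zero] at h
  simp only at h ⊢
  rw [h]
  have hnil : PySem.List.slice inner (some (0:Int)) (some (0:Int)) = [] := by
    simpa using PySem.List.slice_natCast (a := 0) (b := 0) (xs := inner)
  rw [hnil]
  rcases hm : splitAllR 0 inner with _ | ⟨hd, tl⟩
  · exact absurd hm (splitAllR_ne_nil _ inner)
  · simp [consHead]

theorem evalAstList_toAstList (l : List AstB) :
    evalAstList (toAstList l) = l.map evalAst := by
  induction l with
  | nil => simp [toAstList, evalAstList]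
  | cons h t ih => simp [toAstList, evalAstList, ih]

theorem evalA_eq_evalB (s : List Char) : evalA s = evalAst (parseB s) := by
  suffices H : ∀ (n : Nat) (s : List Char), s.length < n → evalA s = evalAst (parseB s) by
    exact H (s.length + 1) s (by omega)
  intro n
  induction n with
  | zero => intro s h; omega
  | succ n ih =>
    intro s hs
    have hstrip := strip_length_le s
    by_cases hH : PySem.Chars.startswith (PySem.Chars.strip s) ("HEX(".toList) = true
    · have hp : parseB s
          = .hex (PySem.List.slice (PySem.Chars.strip s) (some 4) (some (-1))) := by
        rw [parseB]
        rw [dif_pos ((head_eq_iff _ _ rfl).2 hH)]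
      rw [evalA]
      simp only [dif_pos hH]
      rw [hp, evalAst]
    · have hH' : ¬ PySem.List.slice (PySem.Chars.strip s) none (some 4) = "HEX(".toList :=
        fun h => hH ((head_eq_iff _ _ rfl).1 h)
      by_cases hV : PySem.Chars.startswith (PySem.Chars.strip s) ("REV(".toList) = true
      · have hlt : (PySem.List.slice (PySem.Chars.strip s) (some 4) (some (-1))).length < n := by
          have := body_length_lt (startswith_four_length rfl hV)
          omega
        have hp : parseB s
            = .rev (parseB (PySem.List.slice (PySem.Chars.strip s) (some 4) (some (-1)))) := by
          rw [parseB]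
          rw [dif_neg hH', dif_pos ((head_eq_iff _ _ rfl).2 hV)]
        rw [evalA]
        simp only [dif_neg hH, dif_pos hV]
        rw [hp, evalAst, ih _ hlt]
      · have hV' : ¬ PySem.List.slice (PySem.Chars.strip s) none (some 4) = "REV(".toList :=
          fun h => hV ((head_eq_iff _ _ rfl).1 h)
        by_cases hP : PySem.Chars.startswith (PySem.Chars.strip s) ("REP(".toList) = true
        · have hbody : (PySem.List.slice (PySem.Chars.strip s) (some 4) (some (-1))).length
              < s.length := by
            have := body_length_lt (startswith_four_length rfl hP)
            omega
          rcases hsp : split1R 0 (PySem.List.slice (PySem.Chars.strip s) (some 4) (some (-1)))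
            with _ | ⟨a, b⟩
          · have hp : parseB s = .err := by
              rw [parseB]
              rw [dif_neg hH', dif_neg hV', dif_pos ((head_eq_iff _ _ rfl).2 hP),
                splitFirstB_eq, hsp]
            rw [evalA]
            simp only [dif_neg hH, dif_neg hV, dif_pos hP]
            rw [findCommaA_spec, hsp, hp, evalAst]
            rfl
          · have hp : parseB s = .rep a (parseB b) := by
              rw [parseB]
              rw [dif_neg hH', dif_neg hV', dif_pos ((head_eq_iff _ _ rfl).2 hP),
                splitFirstB_eq, hsp]
            have hdec := split1R_decomp hsp
            have hblt : b.length < n := by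
              have := (split1R_len hsp).2
              omega
            rw [evalA]
            simp only [dif_neg hH, dif_neg hV, dif_pos hP]
            rw [findCommaA_spec, hsp]
            simp only [Option.map_some]
            have hnstr : PySem.List.slice
                (PySem.List.slice (PySem.Chars.strip s) (some 4) (some (-1))) none
                (some (0 + (a.length : Int))) = a := by
              rw [PySem.List.slice_to _ (by omega), hdec]
              rw [show ((0:Int) + (a.length : Int)).toNat = a.length from by omega]
              exact List.take_left
            have hsexpr : PySem.List.slice
                (PySem.List.slice (PySem.Chars.strip s) (some 4) (some (-1)))
                (some (0 + (a.length : Int) + 1)) none = b := by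
              rw [PySem.List.slice_from _ (by omega), hdec]
              rw [show ((0:Int) + (a.length : Int) + 1).toNat = (a ++ [',']).length from by
                simp only [List.length_append, List.length_cons, List.length_nil]
                omega]
              rw [show a ++ ',' :: b = (a ++ [',']) ++ b from by simp]
              exact List.drop_left
            rw [hnstr, hsexpr, hp, evalAst, ih _ hblt]
        · have hP' : ¬ PySem.List.slice (PySem.Chars.strip s) none (some 4) = "REP(".toList :=
            fun h => hP ((head_eq_iff _ _ rfl).1 h)
          by_cases hC : PySem.Chars.startswith (PySem.Chars.strip s) ("CAT(".toList) = true
          · have hbody : (PySem.List.slice (PySem.Chars.strip s) (some 4) (some (-1))).length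
                < s.length := by
              have := body_length_lt (startswith_four_length rfl hC)
              omega
            have hp : parseB s
                = .cat (toAstList ((splitAllB (PySem.List.slice (PySem.Chars.strip s) (some 4) (some (-1)))).attach.map
                    (fun x => parseB x.1))) := by
              rw [parseB]
              rw [dif_neg hH', dif_neg hV', dif_neg hP', dif_pos ((head_eq_iff _ _ rfl).2 hC)]
            rw [evalA]
            simp only [dif_neg hH, dif_neg hV, dif_neg hP, dif_pos hC]
            rw [hp, evalAst, evalAstList_toAstList]
            simp only [List.map_map, Function.comp_def, List.attach_map_val]
            rw [catArgsA_eq, splitAllB_eq]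
            congr 1
            refine List.map_congr_left ?_
            intro x hx
            refine ih x ?_
            have := splitAllR_len hx
            omega
          · have hC' : ¬ PySem.List.slice (PySem.Chars.strip s) none (some 4) = "CAT(".toList :=
              fun h => hC ((head_eq_iff _ _ rfl).1 h)
            have hp : parseB s = .lit (PySem.Chars.strip s) := by
              rw [parseB]
              rw [dif_neg hH', dif_neg hV', dif_neg hP', dif_neg hC']
            rw [evalA]
            simp only [dif_neg hH, dif_neg hV, dif_neg hP, dif_neg hC]
            rw [hp, evalAst, strip_idem]

-- ===== VERDICT (by name: the statement is the Claim_ definition above) =====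
theorem evaluate_spec : Claim_equal_evaluate := by
  intro expr _ _
  unfold Spec_evaluate evaluate evaluate_alt
  rw [evalA_eq_evalB]
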